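-- pv_equiv track=rewrite | github.com/example42/saidata-gen | saidata_gen/search/fuzzy.py | is_partial_match
-- ===== SOURCE A (Python) =====
-- def is_partial_match(query: str, target: str) -> bool:
--     """
--     Check if query is a partial match of target.
--
--     Args:
--         query: Search query
--         target: Target string
--
--     Returns:
--         True if query partially matches target
--     """
--     query_lower = query.lower().strip()
--     target_lower = target.lower().strip()
--
--     # Check for substring match
--     if query_lower in target_lower:
--         return True
--
--     # Check for word-based partial match
--     query_words = query_lower.split()
--     target_words = target_lower.split()
--
--     # If any query word is a prefix of any target word
--     for q_word in query_words:
--         for t_word in target_words: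
--             if t_word.startswith(q_word) and len(q_word) >= 2:
--                 return True
--
--     return False
-- ===== SOURCE B (Python) =====
-- def is_partial_match(query: str, target: str) -> bool:
--     """Prefix-index variant: materialize, for each relevant query-word length,
--     the prefixes of the target words into a set, then test each query word by
--     a flat set lookup."""
--     query_lower = query.lower().strip()
--     target_lower = target.lower().strip()
--
--     if query_lower in target_lower:
--         return True
--
--     query_words = query_lower.split()
--     lengths = list(dict.fromkeys(len(q) for q in query_words if len(q) >= 2))
--
--     prefixes = set()
--     for t_word in target_lower.split():
--         for n in lengths:
--             if n <= len(t_word):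
--                 prefixes.add(t_word[:n])
--
--     return any(q_word in prefixes for q_word in query_words)
-- ===== Notes on version B (the rewrite author's own statement) =====
-- stated objective: alternative
-- what changed: Replaces the nested query-word x target-word startswith scan with a prefix index: the distinct (>=2) query-word lengths are collected once, every target-word prefix of each such length is materialized into a set in one pass, and each query word is then a single flat set-membership test.
import Mathlib
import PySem

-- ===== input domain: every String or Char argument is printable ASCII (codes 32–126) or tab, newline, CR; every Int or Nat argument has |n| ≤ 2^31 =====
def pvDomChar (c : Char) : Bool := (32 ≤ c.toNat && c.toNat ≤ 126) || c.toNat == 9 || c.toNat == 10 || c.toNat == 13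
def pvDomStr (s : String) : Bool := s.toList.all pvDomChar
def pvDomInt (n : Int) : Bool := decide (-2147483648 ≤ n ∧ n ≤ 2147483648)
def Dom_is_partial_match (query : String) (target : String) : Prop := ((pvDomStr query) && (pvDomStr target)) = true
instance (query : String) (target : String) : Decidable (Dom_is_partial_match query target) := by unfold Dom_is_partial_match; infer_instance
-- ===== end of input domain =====

-- B replaces A's nested query×target startswith scan by building a set of all
-- length-≥2 prefixes of the target words once and testing each query word by a
-- flat set-membership lookup (alternative decomposition, same results).

-- ===== PORT A =====
def is_partial_match (query : String) (target : String) : Bool :=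
  let query_lower := PySem.Str.strip (PySem.Str.lower query)
  let target_lower := PySem.Str.strip (PySem.Str.lower target)
  if PySem.Str.isIn query_lower target_lower then true
  else
    let query_words := PySem.Str.split₀ query_lower
    let target_words := PySem.Str.split₀ target_lower
    query_words.any (fun q_word =>
      target_words.any (fun t_word =>
        PySem.Str.startswith t_word q_word && decide (2 ≤ PySem.Str.len q_word)))

-- ===== PORT B =====
def is_partial_match_alt (query : String) (target : String) : Bool :=
  let query_lower := PySem.Str.strip (PySem.Str.lower query)
  let target_lower := PySem.Str.strip (PySem.Str.lower target)
  if PySem.Str.isIn query_lower target_lower then true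
  else
    let query_words := PySem.Str.split₀ query_lower
    let lengths : List Int :=
      PySem.List.dedup ((query_words.filter (fun q => decide (2 ≤ PySem.Str.len q))).map PySem.Str.len)
    let prefixes : PySem.Set String :=
      (PySem.Str.split₀ target_lower).foldl (fun s t_word =>
        lengths.foldl (fun s n =>
          if n ≤ PySem.Str.len t_word then PySem.Set.add s (PySem.Str.slice t_word none (some n))
          else s) s)
        PySem.Set.empty
    query_words.any (fun q_word => PySem.Set.contains prefixes q_word)

-- ===== PRECONDITION & SPEC =====
def Spec_is_partial_match (query : String) (target : String) (out : Bool) : Prop := out = is_partial_match_alt query target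
instance (query : String) (target : String) (out : Bool) : Decidable (Spec_is_partial_match query target out) := by unfold Spec_is_partial_match; infer_instance

-- ===== CLAIM (what is proved, stated in full; the proofs are below) =====
def Claim_equal_is_partial_match : Prop := ∀ (query : String) (target : String), Dom_is_partial_match query target → Spec_is_partial_match query target (is_partial_match query target)

-- ===== LEMMAS AND PROOFS =====

-- membership in a guarded fold of Set.add over a list
theorem pv_mem_foldl_add_if {α β : Type} [BEq α] [LawfulBEq α] (l : List β) (p : β → Prop)
    [DecidablePred p] (g : β → α) (s : PySem.Set α) (x : α) :
    (x ∈ l.foldl (fun s c => if p c then PySem.Set.add s (g c) else s) s) ↔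
      x ∈ s ∨ ∃ c ∈ l, p c ∧ x = g c := by
  induction l generalizing s with
  | nil => simp
  | cons a l ih =>
    by_cases hp : p a
    · simp [List.foldl_cons, hp, ih, PySem.Set.mem_add]; tauto
    · simp [List.foldl_cons, hp, ih]

-- membership in the nested prefix-building fold
theorem pv_mem_prefixes (tws : List String) (lengths : List Int) (s : PySem.Set String)
    (x : String) :
    (x ∈ tws.foldl (fun s t =>
        lengths.foldl (fun s n =>
          if n ≤ PySem.Str.len t then PySem.Set.add s (PySem.Str.slice t none (some n))
          else s) s) s) ↔
      x ∈ s ∨ ∃ t ∈ tws, ∃ n ∈ lengths, n ≤ PySem.Str.len t ∧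
        x = PySem.Str.slice t none (some n) := by
  induction tws generalizing s with
  | nil => simp
  | cons t tws ih =>
    simp only [List.foldl_cons, ih, pv_mem_foldl_add_if, List.mem_cons]
    constructor
    · rintro (⟨h | ⟨n, hn, h1, rfl⟩⟩ | ⟨u, hu, n, hn, h1, rfl⟩)
      · exact Or.inl h
      · exact Or.inr ⟨t, Or.inl rfl, n, hn, h1, rfl⟩
      · exact Or.inr ⟨u, Or.inr hu, n, hn, h1, rfl⟩
    · rintro (h | ⟨u, (rfl | hu), n, hn, h1, rfl⟩)
      · exact Or.inl (Or.inl h)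
      · exact Or.inl (Or.inr ⟨n, hn, h1, rfl⟩)
      · exact Or.inr ⟨u, hu, n, hn, h1, rfl⟩

-- t[:n] with 0 ≤ n is the length-n take of t's characters
theorem pv_slice_prefix (t : String) (n : Int) (h0 : 0 ≤ n) :
    (PySem.Str.slice t none (some n)).toList = t.toList.take n.toNat := by
  rw [PySem.Str.toList_slice, PySem.Chars.slice_eq_listSlice, PySem.List.slice_to _ h0]

-- the main transfer: A's nested any equals B's indexed membership any
theorem pv_any_eq (qws tws : List String) :
    (qws.any (fun q => tws.any (fun t =>
        PySem.Str.startswith t q && decide (2 ≤ PySem.Str.len q)))) =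
      (qws.any (fun q => PySem.Set.contains
        (tws.foldl (fun s t =>
          (PySem.List.dedup ((qws.filter (fun q => decide (2 ≤ PySem.Str.len q))).map PySem.Str.len)).foldl
            (fun s n =>
              if n ≤ PySem.Str.len t then PySem.Set.add s (PySem.Str.slice t none (some n))
              else s) s)
          PySem.Set.empty) q)) := by
  rw [Bool.eq_iff_iff]
  simp only [List.any_eq_true, PySem.Set.contains_iff, pv_mem_prefixes, PySem.Set.empty,
    List.not_mem_nil, false_or, PySem.List.mem_dedup, List.mem_map, List.mem_filter,
    Bool.and_eq_true, decide_eq_true_eq]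
  constructor
  · rintro ⟨q, hq, t, ht, hsw, hlen⟩
    have hpre : q.toList <+: t.toList :=
      (PySem.Chars.startswith_iff t.toList q.toList).mp (by simpa using hsw)
    have hle : q.toList.length ≤ t.toList.length := hpre.length_le
    refine ⟨q, hq, t, ht, PySem.Str.len q, ⟨q, ⟨hq, hlen⟩, rfl⟩, ?_, ?_⟩
    · rw [PySem.Str.len_eq, PySem.Str.len_eq]; omega
    · apply String.toList_injective
      rw [pv_slice_prefix t _ (by rw [PySem.Str.len_eq]; positivity)]
      have : (PySem.Str.len q).toNat = q.toList.length := by rw [PySem.Str.len_eq]; simp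
      rw [this]
      exact List.prefix_iff_eq_take.mp hpre
  · rintro ⟨q, hq, t, ht, n, ⟨q', ⟨hq', hlen'⟩, rfl⟩, h1, rfl⟩
    have h0 : (0:Int) ≤ PySem.Str.len q' := by rw [PySem.Str.len_eq]; positivity
    have hq2 : (PySem.Str.slice t none (some (PySem.Str.len q'))).toList =
        t.toList.take (PySem.Str.len q').toNat := pv_slice_prefix t _ h0
    refine ⟨_, hq, t, ht, ?_, ?_⟩
    · rw [PySem.Str.startswith_eq, PySem.Chars.startswith_iff, hq2]
      exact List.take_prefix _ _
    · have hlt : (PySem.Str.len q').toNat = q'.toList.length := by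
        rw [PySem.Str.len_eq]; simp
      rw [PySem.Str.len_eq, hq2, hlt]
      simp only [List.length_take]
      simp only [PySem.Str.len_eq] at hlen' h1
      omega

-- ===== VERDICT (by name: the statement is the Claim_ definition above) =====
theorem is_partial_match_spec : Claim_equal_is_partial_match := by
  intro query target _
  unfold Spec_is_partial_match is_partial_match is_partial_match_alt
  simp only
  split
  · rfl
  · exact pv_any_eq _ _
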